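-- pv_equiv track=rewrite | github.com/M4mB14/ENU_Cipher | SPN.py | pbox_permutation
-- ===== SOURCE A (Python) =====
-- PBOX_MAP = {
--     1: 12, 2: 3, 3: 9, 4: 14,
--     5: 1, 6: 7, 7: 15, 8: 4,
--     9: 10, 10: 16, 11: 8, 12: 2,
--     13: 13, 14: 6, 15: 11, 16: 5
-- }
--
-- INV_PBOX_MAP = {v: k for k, v in PBOX_MAP.items()}
--
-- def pbox_permutation(bits, inverse=False):
--     out_bits = ""
--     table = INV_PBOX_MAP if inverse else PBOX_MAP
--     for i in range(0, len(bits), 16):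
--         block = bits[i:i+16]
--         if len(block) < 16:
--             block = block.ljust(16, '0')
--         permuted = ['0'] * 16
--         for src, dest in table.items():
--             if src <= len(block):
--                 permuted[dest - 1] = block[src - 1]
--         out_bits += ''.join(permuted)
--     return out_bits
-- ===== SOURCE B (Python) =====
-- # Flat single pass: output position k pulls its source character straight from
-- # the input via index arithmetic -- no block slicing, no padding, no dict scan.
-- _FWD_GATHER = [4, 11, 1, 7, 15, 13, 5, 10, 2, 8, 14, 0, 12, 3, 6, 9]
-- _INV_GATHER = [11, 2, 8, 13, 0, 6, 14, 3, 9, 15, 7, 1, 12, 5, 10, 4]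
--
-- def pbox_permutation(bits, inverse=False):
--     g = _INV_GATHER if inverse else _FWD_GATHER
--     n = len(bits)
--     total = ((n + 15) // 16) * 16
--     out = []
--     for k in range(total):
--         s = (k - k % 16) + g[k % 16]
--         out.append(bits[s] if s < n else '0')
--     return ''.join(out)
-- ===== Notes on version B (the rewrite author's own statement) =====
-- stated objective: alternative
-- what changed: B makes one flat pass over output positions, computing each character's source index arithmetically ((k - k%16) + gather[k%16]) from hardcoded gather tables, instead of A's loop that slices a 16-char block, pads it, and scatters it through the permutation dict into a mutable buffer.
import Mathlib
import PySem

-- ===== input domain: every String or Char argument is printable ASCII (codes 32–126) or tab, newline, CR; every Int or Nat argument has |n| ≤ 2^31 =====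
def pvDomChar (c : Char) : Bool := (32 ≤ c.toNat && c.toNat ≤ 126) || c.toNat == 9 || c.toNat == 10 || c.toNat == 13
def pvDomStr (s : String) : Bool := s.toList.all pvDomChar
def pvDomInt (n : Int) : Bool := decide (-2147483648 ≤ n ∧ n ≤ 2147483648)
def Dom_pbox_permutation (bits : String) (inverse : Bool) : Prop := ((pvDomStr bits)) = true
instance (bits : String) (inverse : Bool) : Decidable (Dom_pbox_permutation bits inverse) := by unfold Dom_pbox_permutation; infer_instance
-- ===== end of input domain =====

-- B replaces A's block-slice / pad / per-block dict scatter with one flat pass over output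
-- positions, each pulling its source character directly by index arithmetic (alternative).

-- ===== PORT A =====
-- PBOX_MAP as an association list in insertion order
def pboxTable : List (Nat × Nat) :=
  [(1,12),(2,3),(3,9),(4,14),(5,1),(6,7),(7,15),(8,4),
   (9,10),(10,16),(11,8),(12,2),(13,13),(14,6),(15,11),(16,5)]

-- INV_PBOX_MAP = {v: k for k, v in PBOX_MAP.items()} (iteration order of the comprehension)
def invPboxTable : List (Nat × Nat) := pboxTable.map (fun p => (p.2, p.1))

-- the for-loop over range(0, len(bits), 16) taking slices bits[i:i+16], as recursion on the rest
def pvLoopA (table : List (Nat × Nat)) (rest : List Char) : List Char :=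
  if h : rest = [] then []
  else
    let block0 := rest.take 16
    let block := if block0.length < 16 then block0 ++ List.replicate (16 - block0.length) '0' else block0
    (table.foldl
      (fun acc sd =>
        if sd.1 ≤ block.length then acc.set (sd.2 - 1) (block.getD (sd.1 - 1) '0') else acc)
      (List.replicate 16 '0'))
    ++ pvLoopA table (rest.drop 16)
  termination_by rest.length
  decreasing_by
    have : 0 < rest.length := List.length_pos_iff.mpr h
    simp only [List.length_drop]; omega

def pbox_permutation (bits : String) (inverse : Bool) : String :=
  String.mk (pvLoopA (if inverse then invPboxTable else pboxTable) bits.toList)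

-- ===== PORT B =====
-- hardcoded gather tables of Source B (out position j reads source position gather[j] of its block)
def fwdGather : List Nat := [4, 11, 1, 7, 15, 13, 5, 10, 2, 8, 14, 0, 12, 3, 6, 9]
def invGather : List Nat := [11, 2, 8, 13, 0, 6, 14, 3, 9, 15, 7, 1, 12, 5, 10, 4]

def pbox_permutation_alt (bits : String) (inverse : Bool) : String :=
  let g := if inverse then invGather else fwdGather
  let l := bits.toList
  let n := l.length
  let total := ((n + 15) / 16) * 16
  String.mk ((List.range total).map (fun k =>
    let s := (k - k % 16) + g.getD (k % 16) 0
    if s < n then l.getD s '0' else '0'))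

-- ===== PRECONDITION & SPEC =====
def Spec_pbox_permutation (bits : String) (inverse : Bool) (out : String) : Prop := out = pbox_permutation_alt bits inverse
instance (bits : String) (inverse : Bool) (out : String) : Decidable (Spec_pbox_permutation bits inverse out) := by unfold Spec_pbox_permutation; infer_instance

-- ===== CLAIM (what is proved, stated in full; the proofs are below) =====
def Claim_equal_pbox_permutation : Prop := ∀ (bits : String) (inverse : Bool), Dom_pbox_permutation bits inverse → Spec_pbox_permutation bits inverse (pbox_permutation bits inverse)

-- ===== LEMMAS AND PROOFS =====

-- the gather table Source B selects for the given direction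
def pvG (inverse : Bool) : List Nat := if inverse then invGather else fwdGather

-- B's flat pass, abstracted over the character list (definitionally pbox_permutation_alt's body)
def pvFlat (inverse : Bool) (l : List Char) : List Char :=
  (List.range (((l.length + 15) / 16) * 16)).map (fun k =>
    if (k - k % 16) + (pvG inverse).getD (k % 16) 0 < l.length
    then l.getD ((k - k % 16) + (pvG inverse).getD (k % 16) 0) '0' else '0')

-- reading the padded block at j < 16 = indexed read of l with default '0'
theorem pv_getD_pad (l : List Char) (j : Nat) (hj : j < 16) :
    (l.take 16 ++ List.replicate (16 - (l.take 16).length) '0').getD j '0'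
    = if j < l.length then l.getD j '0' else '0' := by
  have hlen : (l.take 16).length = min 16 l.length := List.length_take
  by_cases h : j < l.length
  · rw [if_pos h, List.getD_append _ _ _ j (by omega)]
    rw [List.getD_eq_getElem?_getD, List.getElem?_take, if_pos hj, ← List.getD_eq_getElem?_getD]
  · rw [if_neg h, List.getD_eq_getElem?_getD, List.getElem?_append_right (by omega),
        List.getElem?_replicate, if_pos (by omega)]
    rfl

-- per 16-char block: A's scatter over the table = gather by B's index list
set_option maxHeartbeats 2000000 in
theorem pv_block_eq (inverse : Bool) (block : List Char) (h : block.length = 16) :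
    ((if inverse then invPboxTable else pboxTable).foldl
      (fun acc sd =>
        if sd.1 ≤ block.length then acc.set (sd.2 - 1) (block.getD (sd.1 - 1) '0') else acc)
      (List.replicate 16 '0'))
    = (List.range 16).map (fun j => block.getD ((pvG inverse).getD j 0) '0') := by
  rcases block with _|⟨c0,_|⟨c1,_|⟨c2,_|⟨c3,_|⟨c4,_|⟨c5,_|⟨c6,_|⟨c7,_|⟨c8,_|⟨c9,_|⟨c10,_|⟨c11,_|⟨c12,_|⟨c13,_|⟨c14,_|⟨c15,rest⟩⟩⟩⟩⟩⟩⟩⟩⟩⟩⟩⟩⟩⟩⟩⟩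
  all_goals simp only [List.length_cons, List.length_nil] at h
  all_goals try omega
  obtain rfl : rest = [] := List.length_eq_zero_iff.mp (by omega)
  cases inverse <;> rfl

set_option maxHeartbeats 1000000 in
theorem pv_loop_eq (inverse : Bool) (l : List Char) :
    pvLoopA (if inverse then invPboxTable else pboxTable) l = pvFlat inverse l := by
  have hg16 : ∀ j < 16, (pvG inverse).getD j 0 < 16 := by cases inverse <;> decide
  have H : ∀ (n : ℕ) (l : List Char), l.length ≤ n →
      pvLoopA (if inverse then invPboxTable else pboxTable) l = pvFlat inverse l := by
    intro n
    induction n with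
    | zero =>
        intro l hl
        obtain rfl : l = [] := List.length_eq_zero_iff.mp (by omega)
        rw [pvLoopA]; simp [pvFlat]
    | succ n ihn =>
        intro l hl
        by_cases h : l = []
        · subst h; rw [pvLoopA]; simp [pvFlat]
        · have hpos : 0 < l.length := List.length_pos_iff.mpr h
          rw [pvLoopA]
          simp only [dif_neg h]
          have htk : (l.take 16).length = min 16 l.length := List.length_take
          have hpad :
              (if (l.take 16).length < 16
                 then l.take 16 ++ List.replicate (16 - (l.take 16).length) '0'
                 else l.take 16)
              = l.take 16 ++ List.replicate (16 - (l.take 16).length) '0' := by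
            by_cases hc : (l.take 16).length < 16
            · rw [if_pos hc]
            · rw [if_neg hc]
              have hz : 16 - (l.take 16).length = 0 := by omega
              rw [hz]; simp
          simp only [hpad]
          have hblen : ((l.take 16) ++ List.replicate (16 - (l.take 16).length) '0').length = 16 := by
            simp only [List.length_append, List.length_replicate]; omega
          rw [pv_block_eq inverse _ hblen,
              ihn (l.drop 16) (by simp only [List.length_drop]; omega)]
          simp only [pvFlat, List.length_drop]
          have htot : (l.length + 15) / 16 * 16 = 16 + (l.length - 16 + 15) / 16 * 16 := by omega
          rw [htot, List.range_add, List.map_append, List.map_map]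
          congr 1
          · refine List.map_congr_left ?_
            intro k hk
            have hk16 : k < 16 := List.mem_range.mp hk
            have e1 : k % 16 = k := Nat.mod_eq_of_lt hk16
            rw [pv_getD_pad l ((pvG inverse).getD k 0) (hg16 _ hk16)]
            simp only [e1, Nat.sub_self, Nat.zero_add]
          · refine List.map_congr_left ?_
            intro k hk
            have hk' : k < (l.length - 16 + 15) / 16 * 16 := List.mem_range.mp hk
            have hn17 : 17 ≤ l.length := by omega
            simp only [Function.comp_apply]
            have e1 : (16 + k) % 16 = k % 16 := Nat.add_mod_left 16 k
            have e2 : k % 16 ≤ k := Nat.mod_le k 16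
            have e3 : (16 + k) - (16 + k) % 16 + (pvG inverse).getD ((16 + k) % 16) 0
                = 16 + (k - k % 16 + (pvG inverse).getD (k % 16) 0) := by
              rw [e1]; omega
            rw [e3]
            by_cases hc : k - k % 16 + (pvG inverse).getD (k % 16) 0 < l.length - 16
            · rw [if_pos hc,
                  if_pos (show 16 + (k - k % 16 + (pvG inverse).getD (k % 16) 0) < l.length by omega)]
              simp only [List.getD_eq_getElem?_getD, List.getElem?_drop]
            · rw [if_neg hc,
                  if_neg (show ¬ 16 + (k - k % 16 + (pvG inverse).getD (k % 16) 0) < l.length by omega)]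
  exact H l.length l le_rfl

-- ===== VERDICT (by name: the statement is the Claim_ definition above) =====
theorem pbox_permutation_spec : Claim_equal_pbox_permutation := by
  intro bits inverse _
  show pbox_permutation bits inverse = pbox_permutation_alt bits inverse
  unfold pbox_permutation pbox_permutation_alt
  rw [pv_loop_eq]
  rfl
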